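-- pv_equiv track=rewrite | github.com/Artisan-Lab/SafeNet | src/process/astsimpletree.py | get_level_order
-- ===== SOURCE A (Python) =====
-- from collections import deque
--
-- def get_level_order(node_list, edge_list):
--     root = node_list[0]
--     queue = deque()
--     queue.append(root)
--     level_order = []
--     while queue:
--         node_val = queue.popleft()
--         level_order.append(str(node_val))
--         children = [edge_list[1][i] for i, val in enumerate(edge_list[0]) if val == node_val]
--         queue.extend(children)
--     return level_order
-- ===== SOURCE B (Python) =====
-- def get_level_order(node_list, edge_list):
--     root = node_list[0]
--     parents = edge_list[0]
--     kids = edge_list[1] if len(edge_list) > 1 else []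
--     children = {}
--     for p, c in zip(parents, kids):
--         children.setdefault(p, []).append(c)
--     queue = [root]
--     i = 0
--     while i < len(queue):
--         queue.extend(children.get(queue[i], []))
--         i += 1
--     return [str(v) for v in queue]
-- ===== Notes on version B (the rewrite author's own statement) =====
-- stated objective: faster
-- what changed: B precomputes a parent-to-children adjacency dict in one zip pass and runs BFS with a growing list and read index, so A's per-popped-node scan of the whole edge list disappears.
import Mathlib
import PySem

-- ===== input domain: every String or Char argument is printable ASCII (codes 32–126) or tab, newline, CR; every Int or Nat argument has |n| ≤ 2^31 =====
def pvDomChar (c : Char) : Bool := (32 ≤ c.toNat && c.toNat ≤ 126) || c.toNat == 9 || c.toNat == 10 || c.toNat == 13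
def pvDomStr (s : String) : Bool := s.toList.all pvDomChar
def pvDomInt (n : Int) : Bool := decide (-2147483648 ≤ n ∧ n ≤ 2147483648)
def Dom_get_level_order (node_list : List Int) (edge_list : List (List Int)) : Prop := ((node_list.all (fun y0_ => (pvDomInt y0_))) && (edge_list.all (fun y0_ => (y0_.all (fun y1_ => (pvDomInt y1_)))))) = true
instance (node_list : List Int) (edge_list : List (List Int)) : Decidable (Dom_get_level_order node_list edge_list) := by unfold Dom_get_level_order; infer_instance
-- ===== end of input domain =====

-- B builds the parent→children adjacency dict once from zip(edge_list[0], edge_list[1] or [])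
-- and runs BFS over an index-driven growing list, removing A's per-popped-node scan of the edge rows.


-- ===== PORT A =====
-- fuel bound making the (possibly divergent) Python while-loops total; inside Pre_ (acyclic
-- reachable graph) the real number of pops never reaches it, so it is a pure totalization guard
def pvFuel (ps cs : List Int) : Nat := (ps.length + 1) ^ (cs.length + 2) + 1

-- children = [edge_list[1][i] for i, val in enumerate(edge_list[0]) if val == node_val]
-- edge_list[1][i] stays lazy exactly as in the comprehension: it is only read for a matching i
-- (pyGet? = none, i.e. a Python IndexError, is dropped; such inputs are outside Pre_)
def pvChildrenA (edge_list : List (List Int)) (ps : List Int) (v : Int) : List Int :=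
  (PySem.List.enumerate ps).filterMap (fun iv =>
    if iv.2 = v then (PySem.List.pyGet? edge_list 1).bind (fun cs => PySem.List.pyGet? cs iv.1) else none)

-- while queue: node_val = queue.popleft(); level_order.append(str(node_val)); queue.extend(children)
def pvLoopA (edge_list : List (List Int)) (ps : List Int) : Nat → List Int → List String → List String
  | 0, _, acc => acc
  | _ + 1, [], acc => acc
  | fuel + 1, v :: q, acc =>
      pvLoopA edge_list ps fuel (q ++ pvChildrenA edge_list ps v) (acc ++ [PySem.Int.toStr v])

-- root = node_list[0] and enumerate(edge_list[0]) are what A evaluates unconditionally; on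
-- node_list = [] or edge_list = [] the Python raises IndexError (outside Pre_), port returns []
def get_level_order (node_list : List Int) (edge_list : List (List Int)) : List String :=
  match PySem.List.pyGet? node_list 0, PySem.List.pyGet? edge_list 0 with
  | some root, some ps => pvLoopA edge_list ps (pvFuel ps (edge_list.getD 1 [])) [root] []
  | _, _ => []

-- ===== PORT B =====
-- for p, c in zip(parents, kids): children.setdefault(p, []).append(c)
def pvAdj (ps cs : List Int) : PySem.Dict Int (List Int) :=
  (ps.zip cs).foldl (fun d p => d.modify p.1 [] (· ++ [p.2])) PySem.Dict.empty

-- B's own copy of the totalization fuel guard (same bound as port A's pvFuel)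
def pvFuelB (ps cs : List Int) : Nat := (ps.length + 1) ^ (cs.length + 2) + 1

-- while i < len(queue): queue.extend(children.get(queue[i], [])); i += 1
-- state = (visited prefix queue[:i], pending suffix queue[i:]); same fuel guard as port A
def pvLoopB (adj : PySem.Dict Int (List Int)) : Nat → List Int → List Int → List Int
  | 0, vis, _ => vis
  | _ + 1, vis, [] => vis
  | fuel + 1, vis, v :: pend => pvLoopB adj fuel (vis ++ [v]) (pend ++ adj.getD v [])

-- kids = edge_list[1] if len(edge_list) > 1 else []
def get_level_order_alt (node_list : List Int) (edge_list : List (List Int)) : List String :=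
  match PySem.List.pyGet? node_list 0 with
  | none => []
  | some root =>
    match PySem.List.pyGet? edge_list 0 with
    | none => []
    | some ps =>
      let kids := match PySem.List.pyGet? edge_list 1 with | none => [] | some cs => cs
      (pvLoopB (pvAdj ps kids) (pvFuelB ps kids) [] [root]).map PySem.Int.toStr

-- ===== PRECONDITION & SPEC =====
-- helpers for Pre_: saturated reachability over the valid edges zip(edge_list[0], edge_list[1])
def pvStep (es : List (Int × Int)) (S : List Int) : List Int :=
  es.foldl (fun S e => if e.1 ∈ S ∧ e.2 ∉ S then S ++ [e.2] else S) S

def pvSatN (es : List (Int × Int)) : Nat → List Int → List Int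
  | 0, S => S
  | n + 1, S => pvSatN es n (pvStep es S)

def pvPs (edge_list : List (List Int)) : List Int := edge_list.getD 0 []
def pvCs (edge_list : List (List Int)) : List Int := edge_list.getD 1 []
def pvEdges (edge_list : List (List Int)) : List (Int × Int) := (pvPs edge_list).zip (pvCs edge_list)
-- values reachable from the root (root included)
def pvR (node_list : List Int) (edge_list : List (List Int)) : List Int :=
  pvSatN (pvEdges edge_list) ((pvCs edge_list).length + 2) [node_list.getD 0 0]
-- values reachable from v in at least one step
def pvRplus (edge_list : List (List Int)) (v : Int) : List Int :=
  pvSatN (pvEdges edge_list) ((pvCs edge_list).length + 2)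
    (((pvEdges edge_list).filter (fun e => e.1 == v)).map (·.2))

-- Pre_ = exactly the inputs where the Python A returns normally (no exception, no divergence):
-- both lists non-empty, no parent entry lacking a child entry is reachable from the root (there
-- A raises IndexError on edge_list[1][i]), and no value reachable from the root can reach
-- itself (there A's queue never empties and it diverges).
def Pre_get_level_order (node_list : List Int) (edge_list : List (List Int)) : Prop :=
  node_list ≠ [] ∧ edge_list ≠ [] ∧
  (∀ p ∈ (pvPs edge_list).drop (pvCs edge_list).length, p ∉ pvR node_list edge_list) ∧
  (∀ v ∈ pvR node_list edge_list, v ∉ pvRplus edge_list v)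

instance (node_list : List Int) (edge_list : List (List Int)) : Decidable (Pre_get_level_order node_list edge_list) := by
  unfold Pre_get_level_order; infer_instance

def pvWitness_get_level_order : List Int × List (List Int) := ([1], [[1, 1], [2, 3]])

def Spec_get_level_order (node_list : List Int) (edge_list : List (List Int)) (out : List String) : Prop := out = get_level_order_alt node_list edge_list
instance (node_list : List Int) (edge_list : List (List Int)) (out : List String) : Decidable (Spec_get_level_order node_list edge_list out) := by unfold Spec_get_level_order; infer_instance

-- ===== CLAIM (what is proved, stated in full; the proofs are below) =====
def Claim_equal_get_level_order : Prop := ∀ (node_list : List Int) (edge_list : List (List Int)), Dom_get_level_order node_list edge_list → Pre_get_level_order node_list edge_list → Spec_get_level_order node_list edge_list (get_level_order node_list edge_list)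


-- ===== LEMMAS AND PROOFS =====

-- A's comprehension over enumerate(ps) with lazy cs[i] equals the zip of the two rows filtered
-- on the parent (out-of-range i is dropped on the left, truncated by zip on the right)
lemma pvChildrenA_eq_zip_aux (v : Int) : ∀ (ps cs : List Int) (s : Nat),
    (PySem.List.enumerate ps (s : Int)).filterMap
        (fun iv => if iv.2 = v then PySem.List.pyGet? cs iv.1 else none)
      = ((ps.zip (cs.drop s)).filter (fun e => e.1 == v)).map (·.2) := by
  intro ps
  induction ps with
  | nil => intro cs s; simp [PySem.List.enumerate_nil]
  | cons p ps ih =>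
    intro cs s
    rw [PySem.List.enumerate_cons]
    have hcast : (s : Int) + 1 = ((s + 1 : Nat) : Int) := by push_cast; ring
    by_cases hs : s < cs.length
    · have hdrop : cs.drop s = cs[s] :: cs.drop (s + 1) :=
        (List.drop_eq_getElem_cons hs)
      simp only [List.filterMap_cons, hcast, ih, hdrop, PySem.List.pyGet?_natCast,
        List.zip_cons_cons, List.filter_cons]
      by_cases hp : p = v <;> simp [hp, List.getElem?_eq_getElem hs]
    · have h1 : cs.drop s = [] := List.drop_eq_nil_of_le (by omega)
      have h2 : cs.drop (s + 1) = [] := List.drop_eq_nil_of_le (by omega)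
      have h3 : cs[s]? = none := by simp; omega
      simp only [List.filterMap_cons, hcast, ih, h1, h2, PySem.List.pyGet?_natCast, h3]
      by_cases hp : p = v <;> simp [hp]

-- hence A's inner scan equals B's dict lookup, for kids = edge_list[1] when present, [] otherwise
lemma pvChildrenA_eq_adj (edge_list : List (List Int)) (kids : List Int)
    (hk : (PySem.List.pyGet? edge_list 1).getD [] = kids) (ps : List Int) (v : Int) :
    pvChildrenA edge_list ps v = (pvAdj ps kids).getD v [] := by
  unfold pvChildrenA pvAdj
  rw [PySem.Dict.getD_foldl_modify_append]
  cases h : PySem.List.pyGet? edge_list 1 with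
  | none =>
    simp only [h, Option.getD_none] at hk
    subst hk
    simp [PySem.Dict.getD_empty]
  | some cs =>
    simp only [h, Option.getD_some] at hk
    subst hk
    simp only [Option.bind_some]
    simpa [PySem.Dict.getD_empty] using pvChildrenA_eq_zip_aux v ps cs 0

-- lockstep: A's queue = B's pending list, A's accumulator = str of B's visited prefix
lemma pvLoop_eq (edge_list : List (List Int)) (kids : List Int)
    (hk : (PySem.List.pyGet? edge_list 1).getD [] = kids) (ps : List Int) :
    ∀ (fuel : Nat) (q vis : List Int),
    pvLoopA edge_list ps fuel q (vis.map PySem.Int.toStr)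
      = (pvLoopB (pvAdj ps kids) fuel vis q).map PySem.Int.toStr := by
  intro fuel
  induction fuel with
  | zero => intro q vis; rfl
  | succ n ih =>
    intro q vis
    cases q with
    | nil => rfl
    | cons v q =>
      show pvLoopA edge_list ps n (q ++ pvChildrenA edge_list ps v) (vis.map PySem.Int.toStr ++ [PySem.Int.toStr v])
          = (pvLoopB (pvAdj ps kids) n (vis ++ [v]) (q ++ (pvAdj ps kids).getD v [])).map PySem.Int.toStr
      rw [pvChildrenA_eq_adj edge_list kids hk, show vis.map PySem.Int.toStr ++ [PySem.Int.toStr v] = (vis ++ [v]).map PySem.Int.toStr by simp, ih]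

-- ===== VERDICT (by name: the statement is the Claim_ definition above) =====
theorem get_level_order_spec : Claim_equal_get_level_order := by
  intro node_list edge_list _ hpre
  obtain ⟨hnl, hel, -, -⟩ := hpre
  unfold Spec_get_level_order get_level_order get_level_order_alt
  obtain ⟨root, tl, rfl⟩ : ∃ r t, node_list = r :: t := by
    cases node_list with | nil => exact absurd rfl hnl | cons a b => exact ⟨a, b, rfl⟩
  obtain ⟨ps, rest, rfl⟩ : ∃ p r, edge_list = p :: r := by
    cases edge_list with | nil => exact absurd rfl hel | cons p r => exact ⟨p, r, rfl⟩
  have hk : (PySem.List.pyGet? (ps :: rest) 1).getD [] = (ps :: rest).getD 1 [] := by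
    cases rest with
    | nil => simp [PySem.List.pyGet?, PySem.List.pyIdx?]
    | cons c r => simp [PySem.List.pyGet?, PySem.List.pyIdx?]
  have hmatch : (match PySem.List.pyGet? (ps :: rest) 1 with | none => ([] : List Int) | some cs => cs)
      = (ps :: rest).getD 1 [] := by
    rw [← hk]; cases PySem.List.pyGet? (ps :: rest) 1 <;> rfl
  simp only [PySem.List.pyGet?_zero_cons, hmatch]
  simpa using pvLoop_eq (ps :: rest) ((ps :: rest).getD 1 []) hk ps (pvFuelB ps ((ps :: rest).getD 1 [])) [root] []
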